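-- pv_equiv track=rewrite | github.com/Kevinbeltran123/ML-sports-predictor | src/sports/nba/features/live_pbp_tracker.py | _compute_max_scoring_runs
-- ===== SOURCE A (Python) =====
-- def _compute_max_scoring_runs(scores: list[tuple[int, int]]) -> tuple[int, int]:
--     """Calcula racha de puntos más larga para cada equipo."""
--     if len(scores) < 2:
--         return 0, 0
--
--     home_run = 0
--     away_run = 0
--     home_max = 0
--     away_max = 0
--     prev_h, prev_a = scores[0]
--
--     for h, a in scores[1:]:
--         h_scored = h - prev_h
--         a_scored = a - prev_a
--
--         if h_scored > 0:
--             home_run += h_scored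
--             away_run = 0
--             home_max = max(home_max, home_run)
--
--         if a_scored > 0:
--             away_run += a_scored
--             home_run = 0
--             away_max = max(away_max, away_run)
--
--         prev_h, prev_a = h, a
--
--     return home_max, away_max
-- ===== SOURCE B (Python) =====
-- def _max_run_home(deltas):
--     run = best = 0
--     for h_d, a_d in deltas:
--         if h_d > 0:
--             run += h_d
--             best = max(best, run)
--         if a_d > 0:
--             run = 0
--     return best
--
--
-- def _max_run_away(deltas):
--     run = best = 0
--     for h_d, a_d in deltas:
--         if h_d > 0:
--             run = 0
--         if a_d > 0:
--             run += a_d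
--             best = max(best, run)
--     return best
--
--
-- def _compute_max_scoring_runs(scores: list[tuple[int, int]]) -> tuple[int, int]:
--     if len(scores) < 2:
--         return 0, 0
--     deltas = [(h2 - h1, a2 - a1)
--               for (h1, a1), (h2, a2) in zip(scores, scores[1:])]
--     return _max_run_home(deltas), _max_run_away(deltas)
-- ===== Notes on version B (the rewrite author's own statement) =====
-- stated objective: alternative
-- what changed: Replaces A's single interleaved loop with six mutable variables by an explicit delta list (zip of consecutive scores) plus two independent per-team passes, each keeping only its own run/best pair.
import Mathlib
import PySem

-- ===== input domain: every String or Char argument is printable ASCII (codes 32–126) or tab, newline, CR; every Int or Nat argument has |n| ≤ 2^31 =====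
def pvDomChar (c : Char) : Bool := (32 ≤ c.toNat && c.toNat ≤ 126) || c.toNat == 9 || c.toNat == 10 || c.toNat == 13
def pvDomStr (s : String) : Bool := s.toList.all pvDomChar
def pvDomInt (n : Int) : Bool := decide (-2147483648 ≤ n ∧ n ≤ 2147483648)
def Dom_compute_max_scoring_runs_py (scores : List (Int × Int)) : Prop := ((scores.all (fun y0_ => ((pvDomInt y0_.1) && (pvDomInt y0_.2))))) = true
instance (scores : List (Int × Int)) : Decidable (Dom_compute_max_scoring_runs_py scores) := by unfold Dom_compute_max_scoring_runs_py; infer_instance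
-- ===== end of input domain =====

-- B replaces A's interleaved six-variable loop by a delta list and two independent per-team passes (objective: alternative decomposition, same O(n) cost).

-- ===== PORT A =====
-- A's for-loop over scores[1:], carrying (home_run, away_run, home_max, away_max, prev_h, prev_a)
def pvLoopA : List (Int × Int) → Int → Int → Int → Int → Int → Int → Int × Int
  | [], _, _, home_max, away_max, _, _ => (home_max, away_max)
  | (h, a) :: rest, home_run, away_run, home_max, away_max, prev_h, prev_a =>
    let h_scored := h - prev_h
    let a_scored := a - prev_a
    -- if h_scored > 0: home_run += h_scored; away_run = 0; home_max = max(home_max, home_run)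
    let home_run1 := if h_scored > 0 then home_run + h_scored else home_run
    let away_run1 := if h_scored > 0 then 0 else away_run
    let home_max1 := if h_scored > 0 then max home_max home_run1 else home_max
    -- if a_scored > 0: away_run += a_scored; home_run = 0; away_max = max(away_max, away_run)
    let away_run2 := if a_scored > 0 then away_run1 + a_scored else away_run1
    let home_run2 := if a_scored > 0 then 0 else home_run1
    let away_max2 := if a_scored > 0 then max away_max away_run2 else away_max
    pvLoopA rest home_run2 away_run2 home_max1 away_max2 h a

def compute_max_scoring_runs_py (scores : List (Int × Int)) : Int × Int :=
  if scores.length < 2 then (0, 0)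
  else
    match scores with
    | [] => (0, 0)  -- unreachable: length ≥ 2
    | (prev_h, prev_a) :: rest => pvLoopA rest 0 0 0 0 prev_h prev_a

-- ===== PORT B =====
-- home pass: add-then-reset
def pvMaxRunHome : List (Int × Int) → Int → Int → Int
  | [], _, best => best
  | (h_d, a_d) :: ds, run, best =>
    let run1 := if h_d > 0 then run + h_d else run
    let best1 := if h_d > 0 then max best run1 else best
    let run2 := if a_d > 0 then 0 else run1
    pvMaxRunHome ds run2 best1

-- away pass: reset-then-add
def pvMaxRunAway : List (Int × Int) → Int → Int → Int
  | [], _, best => best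
  | (h_d, a_d) :: ds, run, best =>
    let run1 := if h_d > 0 then 0 else run
    let run2 := if a_d > 0 then run1 + a_d else run1
    let best2 := if a_d > 0 then max best run2 else best
    pvMaxRunAway ds run2 best2

def compute_max_scoring_runs_py_alt (scores : List (Int × Int)) : Int × Int :=
  if scores.length < 2 then (0, 0)
  else
    let deltas := (scores.zip scores.tail).map
      (fun p => (p.2.1 - p.1.1, p.2.2 - p.1.2))
    (pvMaxRunHome deltas 0 0, pvMaxRunAway deltas 0 0)

-- ===== PRECONDITION & SPEC =====
def Spec_compute_max_scoring_runs_py (scores : List (Int × Int)) (out : Int × Int) : Prop := out = compute_max_scoring_runs_py_alt scores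
instance (scores : List (Int × Int)) (out : Int × Int) : Decidable (Spec_compute_max_scoring_runs_py scores out) := by unfold Spec_compute_max_scoring_runs_py; infer_instance

-- ===== CLAIM (what is proved, stated in full; the proofs are below) =====
def Claim_equal_compute_max_scoring_runs_py : Prop := ∀ (scores : List (Int × Int)), Dom_compute_max_scoring_runs_py scores → Spec_compute_max_scoring_runs_py scores (compute_max_scoring_runs_py scores)

-- ===== LEMMAS AND PROOFS =====

-- consecutive-difference list of (prev :: rest)
def pvDeltas : Int × Int → List (Int × Int) → List (Int × Int)
  | _, [] => []
  | (ph, pa), (h, a) :: rest => (h - ph, a - pa) :: pvDeltas (h, a) rest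

theorem pvZip_eq_deltas (rest : List (Int × Int)) (p : Int × Int) :
    ((p :: rest).zip rest).map (fun q => (q.2.1 - q.1.1, q.2.2 - q.1.2))
      = pvDeltas p rest := by
  induction rest generalizing p with
  | nil => rfl
  | cons q rest ih =>
    obtain ⟨ph, pa⟩ := p
    obtain ⟨h, a⟩ := q
    simp [List.zip, pvDeltas, ← ih (h, a)]

theorem pvLoopA_eq_passes (rest : List (Int × Int)) (ph pa hr ar hm am : Int) :
    pvLoopA rest hr ar hm am ph pa
      = (pvMaxRunHome (pvDeltas (ph, pa) rest) hr hm,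
         pvMaxRunAway (pvDeltas (ph, pa) rest) ar am) := by
  induction rest generalizing ph pa hr ar hm am with
  | nil => rfl
  | cons q rest ih =>
    obtain ⟨h, a⟩ := q
    simp only [pvLoopA, pvDeltas, pvMaxRunHome, pvMaxRunAway]
    split_ifs <;> simp [ih]

-- ===== VERDICT (by name: the statement is the Claim_ definition above) =====
theorem compute_max_scoring_runs_py_spec : Claim_equal_compute_max_scoring_runs_py := by
  intro scores _
  unfold Spec_compute_max_scoring_runs_py compute_max_scoring_runs_py compute_max_scoring_runs_py_alt
  split_ifs with hlen
  · rfl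
  · match scores with
    | [] => simp at hlen
    | (ph, pa) :: rest =>
      simp only [List.tail_cons, pvZip_eq_deltas rest (ph, pa)]
      exact pvLoopA_eq_passes rest ph pa 0 0 0 0
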